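-- pv_equiv track=rewrite | github.com/Excess-GitHub/Quechua-Segmentation-Models | src/preprocessing.py | get_boundary_labels
-- ===== SOURCE A (Python) =====
-- from typing import List, Tuple, Set
--
-- def get_boundary_labels(tokens: List[str], morph_tokens: List[List[str]]) -> List[int]:
--     """
--     Generate binary boundary labels for token-level boundary prediction.
--
--     A position i has label 1 if there's a morpheme boundary after token i.
--     The last position always has label 0 (no boundary at end of word).
--
--     Args:
--         tokens: Grapheme tokens for the full word
--         morph_tokens: List of grapheme token lists, one per morpheme
--
--     Returns:
--         List of binary labels (0 or 1) of same length as tokens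
--     """
--     labels = [0] * len(tokens)
--     idx = 0
--
--     for mt in morph_tokens[:-1]:  # Skip last morpheme (no boundary after it)
--         idx += len(mt)
--         if 0 < idx <= len(tokens):
--             labels[idx - 1] = 1
--
--     return labels
-- ===== SOURCE B (Python) =====
-- def get_boundary_labels(tokens, morph_tokens):
--     # Two-pointer merge: the boundary positions (prefix sums of morpheme lengths)
--     # form a nondecreasing sequence, so merge it against positions 1..n in one
--     # synchronized pass instead of scatter-writing into a preallocated array.
--     sums = []
--     acc = 0
--     for mt in morph_tokens[:-1]:
--         acc += len(mt)
--         sums.append(acc)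
--     m = len(sums)
--     labels = []
--     j = 0
--     for p in range(1, len(tokens) + 1):
--         while j < m and sums[j] < p:
--             j += 1
--         labels.append(1 if j < m and sums[j] == p else 0)
--     return labels
-- ===== Notes on version B (the rewrite author's own statement) =====
-- stated objective: alternative
-- what changed: B builds the nondecreasing list of cumulative boundary positions and then produces the labels by a two-pointer merge of that sorted list against the positions 1..n (advancing one pointer past smaller sums, emitting 1 on a match), instead of A's scatter-writes of 1s into a preallocated zero array while walking the morphemes.
import Mathlib
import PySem

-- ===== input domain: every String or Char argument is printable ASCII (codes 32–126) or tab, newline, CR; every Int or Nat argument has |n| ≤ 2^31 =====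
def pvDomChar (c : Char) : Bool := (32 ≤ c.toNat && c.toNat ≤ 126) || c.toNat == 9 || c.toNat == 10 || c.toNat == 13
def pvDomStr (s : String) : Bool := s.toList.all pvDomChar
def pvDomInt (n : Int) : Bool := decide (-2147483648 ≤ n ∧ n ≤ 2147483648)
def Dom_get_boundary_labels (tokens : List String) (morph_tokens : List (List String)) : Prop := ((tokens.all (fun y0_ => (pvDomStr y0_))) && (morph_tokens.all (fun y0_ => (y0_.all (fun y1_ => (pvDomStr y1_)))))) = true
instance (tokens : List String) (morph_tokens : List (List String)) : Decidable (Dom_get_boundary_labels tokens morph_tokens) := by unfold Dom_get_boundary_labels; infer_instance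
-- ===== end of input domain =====

-- B builds the nondecreasing list of cumulative boundary positions and emits the labels by a
-- two-pointer merge of that sorted list against the positions 1..n, instead of A's scatter-writes
-- of 1s into a preallocated zero array; same cost, different algorithm (objective: alternative).

-- ===== PORT A =====
def get_boundary_labels (tokens : List String) (morph_tokens : List (List String)) : List Int :=
  let labels : List Int := List.replicate tokens.length 0
  let res := (PySem.List.slice morph_tokens none (some (-1))).foldl
    (fun (st : List Int × Int) mt =>
      let idx : Int := st.2 + (mt.length : Int)
      ((if 0 < idx ∧ idx ≤ (tokens.length : Int) then PySem.List.pySetD st.1 (idx - 1) 1 else st.1),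
       idx))
    (labels, 0)
  res.1

-- ===== PORT B =====
-- B-side helper: the inner `while j < m and sums[j] < p: j += 1` loop.
def pvAdv (sums : List Int) (p : Int) (j : Nat) : Nat :=
  if j < sums.length ∧ sums.getD j 0 < p then pvAdv sums p (j + 1) else j
termination_by sums.length - j

def get_boundary_labels_alt (tokens : List String) (morph_tokens : List (List String)) : List Int :=
  let sums : List Int :=
    ((PySem.List.slice morph_tokens none (some (-1))).foldl
      (fun (st : List Int × Int) mt =>
        let acc : Int := st.2 + (mt.length : Int)
        (st.1 ++ [acc], acc))
      (([] : List Int), 0)).1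
  let m : Nat := sums.length
  let res := (PySem.List.pyRange 1 ((tokens.length : Int) + 1) 1).foldl
    (fun (st : List Int × Nat) p =>
      let j := pvAdv sums p st.2
      (st.1 ++ [if j < m ∧ sums.getD j 0 = p then (1 : Int) else 0], j))
    (([] : List Int), 0)
  res.1

-- ===== PRECONDITION & SPEC =====
def Spec_get_boundary_labels (tokens : List String) (morph_tokens : List (List String)) (out : List Int) : Prop := out = get_boundary_labels_alt tokens morph_tokens
instance (tokens : List String) (morph_tokens : List (List String)) (out : List Int) : Decidable (Spec_get_boundary_labels tokens morph_tokens out) := by unfold Spec_get_boundary_labels; infer_instance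

-- ===== CLAIM (what is proved, stated in full; the proofs are below) =====
def Claim_equal_get_boundary_labels : Prop := ∀ (tokens : List String) (morph_tokens : List (List String)), Dom_get_boundary_labels tokens morph_tokens → Spec_get_boundary_labels tokens morph_tokens (get_boundary_labels tokens morph_tokens)

-- ===== LEMMAS AND PROOFS =====

/-- The cumulative boundary positions produced from start value `idx` over the morpheme list. -/
def pvCums : Int → List (List String) → List Int
  | _, [] => []
  | idx, mt :: ms => (idx + (mt.length : Int)) :: pvCums (idx + (mt.length : Int)) ms

theorem pvA_foldl_length (n : Nat) (ms : List (List String)) :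
    ∀ (labels : List Int) (idx : Int), labels.length = n →
    ((ms.foldl (fun (st : List Int × Int) mt =>
        ((if 0 < st.2 + (mt.length : Int) ∧ st.2 + (mt.length : Int) ≤ (n : Int)
            then PySem.List.pySetD st.1 (st.2 + (mt.length : Int) - 1) 1 else st.1),
         st.2 + (mt.length : Int)))
      (labels, idx)).1).length = n := by
  induction ms with
  | nil => intro labels idx h; simpa using h
  | cons mt ms ih =>
    intro labels idx h
    simp only [List.foldl_cons]
    apply ih
    split <;> simp [PySem.List.length_pySetD, h]

theorem pvA_foldl_getD (n : Nat) (ms : List (List String)) :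
    ∀ (labels : List Int) (idx : Int), labels.length = n →
    ∀ i : Nat, i < n →
    ((ms.foldl (fun (st : List Int × Int) mt =>
        ((if 0 < st.2 + (mt.length : Int) ∧ st.2 + (mt.length : Int) ≤ (n : Int)
            then PySem.List.pySetD st.1 (st.2 + (mt.length : Int) - 1) 1 else st.1),
         st.2 + (mt.length : Int)))
      (labels, idx)).1).getD i 0 =
      if ((i : Int) + 1) ∈ pvCums idx ms then 1 else labels.getD i 0 := by
  induction ms with
  | nil => intro labels idx h i hi; simp [pvCums]
  | cons mt ms ih =>
    intro labels idx h i hi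
    simp only [List.foldl_cons]
    have hlen' : (if 0 < idx + (mt.length : Int) ∧ idx + (mt.length : Int) ≤ (n : Int)
        then PySem.List.pySetD labels (idx + (mt.length : Int) - 1) 1 else labels).length = n := by
      split <;> simp [PySem.List.length_pySetD, h]
    rw [ih _ _ hlen' i hi]
    have hbase : (if 0 < idx + (mt.length : Int) ∧ idx + (mt.length : Int) ≤ (n : Int)
          then PySem.List.pySetD labels (idx + (mt.length : Int) - 1) 1 else labels).getD i 0 =
        if (i : Int) + 1 = idx + (mt.length : Int) then 1 else labels.getD i 0 := by
      by_cases hij : (i : Int) + 1 = idx + (mt.length : Int)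
      · have hguard : 0 < idx + (mt.length : Int) ∧ idx + (mt.length : Int) ≤ (n : Int) := by
          omega
        rw [if_pos hguard, if_pos hij, PySem.List.pySetD_of_nonneg labels 1 (by omega)]
        have htn : (idx + (mt.length : Int) - 1).toNat = i := by omega
        rw [htn]
        simp [List.getD_eq_getElem?_getD, h, hi]
      · rw [if_neg hij]
        by_cases hg : 0 < idx + (mt.length : Int) ∧ idx + (mt.length : Int) ≤ (n : Int)
        · rw [if_pos hg, PySem.List.pySetD_of_nonneg labels 1 (by omega)]
          have htn : (idx + (mt.length : Int) - 1).toNat ≠ i := by omega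
          rw [List.getD_eq_getElem?_getD, List.getElem?_set_ne htn,
            ← List.getD_eq_getElem?_getD]
        · rw [if_neg hg]
    rw [hbase]
    have hcums : (((i : Int) + 1) ∈ pvCums idx (mt :: ms)) ↔
        ((i : Int) + 1 = idx + (mt.length : Int) ∨
          ((i : Int) + 1) ∈ pvCums (idx + (mt.length : Int)) ms) := by
      simp [pvCums]
    simp only [hcums]
    split_ifs <;> tauto

/-- B's prefix-sum fold builds exactly `pvCums`. -/
theorem pvSums_eq (ms : List (List String)) :
    ∀ (l : List Int) (idx : Int),
    ((ms.foldl (fun (st : List Int × Int) mt =>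
        (st.1 ++ [st.2 + (mt.length : Int)], st.2 + (mt.length : Int))) (l, idx)).1)
      = l ++ pvCums idx ms := by
  induction ms with
  | nil => intro l idx; simp [pvCums]
  | cons mt ms ih =>
    intro l idx
    simp only [List.foldl_cons]
    rw [ih]
    simp [pvCums]

theorem pvCums_ge (ms : List (List String)) :
    ∀ (idx : Int) (x : Int), x ∈ pvCums idx ms → idx ≤ x := by
  induction ms with
  | nil => intro idx x hx; simp [pvCums] at hx
  | cons mt ms ih =>
    intro idx x hx
    simp only [pvCums, List.mem_cons] at hx
    rcases hx with h | h
    · omega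
    · have := ih _ _ h; omega

theorem pvCums_sorted (ms : List (List String)) :
    ∀ (idx : Int), List.Pairwise (· ≤ ·) (pvCums idx ms) := by
  induction ms with
  | nil => intro idx; simp [pvCums]
  | cons mt ms ih =>
    intro idx
    simp only [pvCums, List.pairwise_cons]
    exact ⟨fun x hx => pvCums_ge ms _ x hx, ih _⟩

/-- Specification of the inner while loop. -/
theorem pvAdv_spec (sums : List Int) (p : Int) :
    ∀ (j : Nat),
      j ≤ pvAdv sums p j ∧ (pvAdv sums p j ≤ sums.length ∨ pvAdv sums p j = j) ∧
      (∀ k, j ≤ k → k < pvAdv sums p j → sums.getD k 0 < p) ∧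
      ¬ (pvAdv sums p j < sums.length ∧ sums.getD (pvAdv sums p j) 0 < p) := by
  intro j
  induction j using pvAdv.induct sums p with
  | case1 j hcond ih =>
    rw [pvAdv, if_pos hcond]
    obtain ⟨h1, h2, h3, h4⟩ := ih
    refine ⟨by omega, by omega, ?_, h4⟩
    intro k hk1 hk2
    rcases Nat.eq_or_lt_of_le hk1 with rfl | h
    · exact hcond.2
    · exact h3 k h hk2
  | case2 j hcond =>
    rw [pvAdv, if_neg hcond]
    exact ⟨le_refl _, Or.inr rfl, fun k hk1 hk2 => absurd hk1 (by omega), hcond⟩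

/-- With a sorted `sums` and a fully-scanned prefix of smaller elements,
    the two-pointer test is membership. -/
theorem pvMatch_iff (sums : List Int) (hsort : List.Pairwise (· ≤ ·) sums)
    (p : Int) (j : Nat) (hj : j ≤ sums.length)
    (hlow : ∀ k, k < j → sums.getD k 0 < p) :
    (pvAdv sums p j < sums.length ∧ sums.getD (pvAdv sums p j) 0 = p) ↔ p ∈ sums := by
  obtain ⟨h1, h2, h3, h4⟩ := pvAdv_spec sums p j
  set j' := pvAdv sums p j with hj'
  have hj'le : j' ≤ sums.length := by omega
  have hlow' : ∀ k, k < j' → sums.getD k 0 < p := by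
    intro k hk
    by_cases hkj : k < j
    · exact hlow k hkj
    · exact h3 k (by omega) hk
  have hget : ∀ k (hk : k < sums.length), sums.getD k 0 = sums[k] := by
    intro k hk
    rw [List.getD_eq_getElem?_getD, List.getElem?_eq_getElem hk]; rfl
  constructor
  · rintro ⟨hlt, heq⟩
    rw [hget _ hlt] at heq
    rw [← heq]; exact List.getElem_mem _
  · intro hp
    obtain ⟨k, hk, hkeq⟩ := List.mem_iff_getElem.mp hp
    have hmono := List.pairwise_iff_getElem.mp hsort
    have hkj' : ¬ k < j' := by
      intro hc
      have := hlow' k hc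
      rw [hget _ hk, hkeq] at this
      omega
    have hlt : j' < sums.length := by omega
    refine ⟨hlt, ?_⟩
    have hge : ¬ sums.getD j' 0 < p := fun hc => h4 ⟨hlt, hc⟩
    have hle : sums[j'] ≤ sums[k] := by
      rcases Nat.eq_or_lt_of_le (Nat.le_of_not_lt hkj') with heq | h
      · subst heq; exact le_refl _
      · exact hmono j' k hlt hk h
    rw [hget _ hlt] at hge ⊢
    rw [hkeq] at hle
    omega

/-- B's position fold produces the membership map. -/
theorem pvB_fold (sums : List Int) (hsort : List.Pairwise (· ≤ ·) sums) :
    ∀ (ps : List Int), List.Pairwise (· ≤ ·) ps →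
    ∀ (acc : List Int) (j : Nat) (b : Int),
      j ≤ sums.length → (∀ k, k < j → sums.getD k 0 < b) → (∀ q ∈ ps, b ≤ q) →
    ((ps.foldl (fun (st : List Int × Nat) p =>
        (st.1 ++ [if pvAdv sums p st.2 < sums.length ∧ sums.getD (pvAdv sums p st.2) 0 = p then (1 : Int) else 0],
         pvAdv sums p st.2))
      (acc, j)).1)
      = acc ++ ps.map (fun p => if p ∈ sums then 1 else 0) := by
  intro ps
  induction ps with
  | nil => intro _ acc j b _ _ _; simp
  | cons p ps ih =>
    intro hps acc j b hj hlow hb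
    simp only [List.foldl_cons]
    obtain ⟨hbp, hps'⟩ := List.pairwise_cons.mp hps
    have hbp' : b ≤ p := hb p (List.mem_cons_self)
    have hlowp : ∀ k, k < j → sums.getD k 0 < p := fun k hk => lt_of_lt_of_le (hlow k hk) hbp'
    obtain ⟨h1, h2, h3, h4⟩ := pvAdv_spec sums p j
    have hj'le : pvAdv sums p j ≤ sums.length := by omega
    have hlow' : ∀ k, k < pvAdv sums p j → sums.getD k 0 < p := by
      intro k hk
      by_cases hkj : k < j
      · exact hlowp k hkj
      · exact h3 k (by omega) hk
    rw [ih hps' _ _ p hj'le hlow' (fun q hq => hbp q hq)]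
    have hiff := pvMatch_iff sums hsort p j hj hlowp
    simp only [List.getD_eq_getElem?_getD] at hiff
    simp [hiff]

theorem get_boundary_labels_eq (tokens : List String) (morph_tokens : List (List String)) :
    get_boundary_labels tokens morph_tokens = get_boundary_labels_alt tokens morph_tokens := by
  simp only [get_boundary_labels, get_boundary_labels_alt]
  rw [pvSums_eq (PySem.List.slice morph_tokens none (some (-1))) [] 0]
  have hsort : List.Pairwise (· ≤ ·) ([] ++ pvCums 0 (PySem.List.slice morph_tokens none (some (-1)))) := by
    simpa using pvCums_sorted (PySem.List.slice morph_tokens none (some (-1))) 0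
  have hps : List.Pairwise (· ≤ ·) (PySem.List.pyRange 1 ((tokens.length : Int) + 1) 1) :=
    (PySem.List.pairwise_lt_pyRange_one 1 ((tokens.length : Int) + 1)).imp (fun h => le_of_lt h)
  rw [pvB_fold _ hsort _ hps [] 0 1 (Nat.zero_le _)
    (fun k hk => absurd hk (Nat.not_lt_zero k))
    (fun q hq => (PySem.List.mem_pyRange_one.mp hq).1)]
  simp only [List.nil_append]
  set cs := pvCums 0 (PySem.List.slice morph_tokens none (some (-1))) with hcs
  have hlenA := pvA_foldl_length tokens.length (PySem.List.slice morph_tokens none (some (-1)))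
    (List.replicate tokens.length 0) 0 (by simp)
  apply List.ext_getElem
  · simp [hlenA, PySem.List.length_pyRange_one]
  · intro i h1 h2
    have hi : i < tokens.length := by omega
    have hA := pvA_foldl_getD tokens.length (PySem.List.slice morph_tokens none (some (-1)))
      (List.replicate tokens.length 0) 0 (by simp) i hi
    have hgetA : ∀ (l : List Int) (hl : i < l.length), l[i]'hl = l.getD i 0 := by
      intro l hl
      rw [List.getD_eq_getElem?_getD, List.getElem?_eq_getElem hl]
      rfl
    rw [hgetA _ h1, hA]
    have hir : i < (PySem.List.pyRange 1 ((tokens.length : Int) + 1) 1).length := by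
      simpa using h2
    rw [List.getElem_map, PySem.List.getElem_pyRange_one]
    have hcomm : ((i : Int) + 1) = (1 : Int) + i := by ring
    rw [hcomm]
    simp [hcs]

-- ===== VERDICT (by name: the statement is the Claim_ definition above) =====
theorem get_boundary_labels_spec : Claim_equal_get_boundary_labels := by
  intro tokens morph_tokens _
  unfold Spec_get_boundary_labels
  exact get_boundary_labels_eq tokens morph_tokens
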